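-- pv_equiv track=rewrite | github.com/ToaruPen/coq-japanese_stable | scripts/scan_activated_ability_names.py | _consume_verbatim_string_body
-- ===== SOURCE A (Python) =====
-- def _consume_verbatim_string_body(text: str, start: int) -> tuple[int, str] | None:
--     chars: list[str] = []
--     index = start
--     while index < len(text):
--         char = text[index]
--         if char == '"':
--             if index + 1 < len(text) and text[index + 1] == '"':
--                 chars.append('"')
--                 index += 2
--                 continue
--             return index + 1, "".join(chars)
--         chars.append(char)
--         index += 1
--     return None
-- ===== SOURCE B (Python) =====
-- def _consume_verbatim_string_body(text: str, start: int) -> tuple[int, str] | None: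
--     parts: list[str] = []
--     index = start
--     while True:
--         q = text.find('"', index)
--         if q == -1:
--             return None
--         parts.append(text[index:q])
--         if q + 1 < len(text) and text[q + 1] == '"':
--             parts.append('"')
--             index = q + 2
--         else:
--             return q + 1, "".join(parts)
-- ===== Notes on version B (the rewrite author's own statement) =====
-- stated objective: faster
-- what changed: Replaced the per-character while-loop that appends one character at a time with a loop driven by text.find('"', index) that hops directly between quote positions and appends whole slices (C-level find/slicing instead of per-character Python-level work).
-- outside the precondition, e.g. on _consume_verbatim_string_body('a"', -2): A returns (0, 'a'), B returns (2, 'a')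
import Mathlib
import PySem

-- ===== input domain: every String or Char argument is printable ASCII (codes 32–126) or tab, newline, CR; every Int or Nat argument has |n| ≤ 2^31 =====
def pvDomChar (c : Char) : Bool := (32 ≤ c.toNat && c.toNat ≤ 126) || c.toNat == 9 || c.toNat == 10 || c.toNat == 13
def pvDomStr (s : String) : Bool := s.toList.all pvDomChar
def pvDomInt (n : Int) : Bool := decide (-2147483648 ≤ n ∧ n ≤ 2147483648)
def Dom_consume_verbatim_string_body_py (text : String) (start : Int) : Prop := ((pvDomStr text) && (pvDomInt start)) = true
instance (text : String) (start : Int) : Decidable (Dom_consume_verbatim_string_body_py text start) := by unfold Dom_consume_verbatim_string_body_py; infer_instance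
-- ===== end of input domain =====

-- B replaces A's per-character scan with find-driven hops between quotes, appending whole slices
-- (measured faster by a constant factor; equivalence of RETURN values is proved on start ≥ 0).

-- ===== PORT A =====
-- literal port of A's while-loop: fuel counts the remaining loop iterations (index strictly increases)
def consumeALoop (l : List Char) : Nat → Int → List Char → Option (Int × String)
  | 0, _, _ => none
  | n+1, index, chars =>
    if index < (l.length : Int) then
      match PySem.List.pyGet? l index with
      | none => none   -- Python raises IndexError here (index < -len); outside Pre_
      | some c =>
        if c = '"' then
          if index + 1 < (l.length : Int) ∧ PySem.List.pyGet? l (index + 1) = some '"' then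
            consumeALoop l n (index + 2) (chars ++ ['"'])
          else some (index + 1, String.ofList chars)
        else consumeALoop l n (index + 1) (chars ++ [c])
    else none

def consume_verbatim_string_body_py (text : String) (start : Int) : Option (Int × String) :=
  consumeALoop text.toList (((text.toList.length : Int) - start).toNat + 1) start []

-- ===== PORT B =====
-- literal port of B's while-loop: q = text.find('"', index); fuel counts iterations (index grows by ≥ 2)
def consumeBLoop (l : List Char) : Nat → Int → List (List Char) → Option (Int × String)
  | 0, _, _ => none
  | n+1, index, parts =>
    let q := PySem.Chars.findFrom l ['"'] index none
    if q = -1 then none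
    else
      let parts' := parts ++ [PySem.List.slice l (some index) (some q)]
      if q + 1 < (l.length : Int) ∧ PySem.List.pyGet? l (q + 1) = some '"' then
        consumeBLoop l n (q + 2) (parts' ++ [['"']])
      else some (q + 1, String.ofList (PySem.Chars.join [] parts'))

def consume_verbatim_string_body_py_alt (text : String) (start : Int) : Option (Int × String) :=
  consumeBLoop text.toList (text.toList.length + 1) start []

-- ===== PRECONDITION & SPEC =====
-- Pre_ excludes negative start, where A either raises IndexError (start < -len(text)) or returns
-- values produced by Python's negative-index wraparound, which makes A rescan part of the text twice
-- — an accident of A's implementation, not the function's job (it is only ever called with a valid index).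
def Pre_consume_verbatim_string_body_py (text : String) (start : Int) : Prop := 0 ≤ start
instance (text : String) (start : Int) : Decidable (Pre_consume_verbatim_string_body_py text start) := by unfold Pre_consume_verbatim_string_body_py; infer_instance

def pvWitness_consume_verbatim_string_body_py : String × Int := ("ab\"c", 0)

def Spec_consume_verbatim_string_body_py (text : String) (start : Int) (out : Option (Int × String)) : Prop := out = consume_verbatim_string_body_py_alt text start
instance (text : String) (start : Int) (out : Option (Int × String)) : Decidable (Spec_consume_verbatim_string_body_py text start out) := by unfold Spec_consume_verbatim_string_body_py; infer_instance

-- ===== CLAIM (what is proved, stated in full; the proofs are below) =====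
def Claim_equal_consume_verbatim_string_body_py : Prop := ∀ (text : String) (start : Int), Dom_consume_verbatim_string_body_py text start → Pre_consume_verbatim_string_body_py text start → Spec_consume_verbatim_string_body_py text start (consume_verbatim_string_body_py text start)

-- ===== LEMMAS AND PROOFS =====

theorem quote_prefix_iff (l : List Char) (j : Nat) : ['"'] <+: l.drop j ↔ l[j]? = some '"' := by
  rw [List.cons_prefix_iff]
  constructor
  · rintro ⟨t, ht, -⟩
    have := congrArg (·[0]?) ht
    simpa [List.getElem?_drop] using this
  · intro h
    have hj : j < l.length := (List.getElem?_eq_some_iff.mp h).1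
    refine ⟨l.drop (j+1), ?_, List.nil_prefix⟩
    rw [List.drop_eq_getElem_cons hj]
    simp_all [List.getElem?_eq_some_iff]

theorem quote_infix_iff (t : List Char) : ['"'] <:+: t ↔ '"' ∈ t := by
  constructor
  · intro h; exact h.mem (by simp)
  · intro h
    obtain ⟨j, hj, he⟩ := List.getElem_of_mem h
    have : ['"'] <+: t.drop j := (quote_prefix_iff t j).mpr (by simp [List.getElem?_eq_some_iff]; exact ⟨hj, he⟩)
    exact this.isInfix.trans (List.drop_suffix j t).isInfix

theorem joinNil_flatten (ps : List (List Char)) : PySem.Chars.join [] ps = ps.flatten := by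
  induction ps with
  | nil => simp [PySem.Chars.join_nil]
  | cons p rest ih =>
    cases rest with
    | nil => simp [PySem.Chars.join_singleton]
    | cons q r => rw [PySem.Chars.join_cons_cons]; simp at ih ⊢; simpa using ih

theorem joinNil_append (ps : List (List Char)) (p : List Char) :
    PySem.Chars.join [] (ps ++ [p]) = PySem.Chars.join [] ps ++ p := by
  simp [joinNil_flatten]

theorem slice_step (l : List Char) (i q : Int) (h0 : 0 ≤ i) (hiq : i < q) (hq : q ≤ (l.length : Int)) :
    ∀ c, l[i.toNat]? = some c →
    PySem.List.slice l (some i) (some q) = c :: PySem.List.slice l (some (i+1)) (some q) := by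
  intro c hc
  rw [PySem.List.slice_toNat _ h0 (by omega), PySem.List.slice_toNat _ (by omega) (by omega)]
  have hi : i.toNat < l.length := (List.getElem?_eq_some_iff.mp hc).1
  rw [List.drop_eq_getElem_cons hi]
  have h1 : (i+1).toNat = i.toNat + 1 := by omega
  have h2 : q.toNat - i.toNat = (q.toNat - (i+1).toNat) + 1 := by omega
  rw [h2, List.take_succ_cons, h1]
  simp_all [List.getElem?_eq_some_iff]

theorem fq_out (l : List Char) (i : Int) (h : (l.length : Int) ≤ i) :
    PySem.Chars.findFrom l ['"'] i none = -1 := by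
  unfold PySem.Chars.findFrom
  have h0 : ¬ i < 0 := by omega
  simp only [h0, if_false]
  by_cases he : (l.length : Int) < i
  · simp [he]
  · have : i = (l.length : Int) := by omega
    subst this
    simp [PySem.Chars.find_eq_neg_one_iff, List.drop_eq_nil_of_le]

theorem fq_bounds (l : List Char) (k : Nat) (hk : k ≤ l.length)
    (h : PySem.Chars.findFrom l ['"'] (k : Int) none ≠ -1) :
    (k : Int) ≤ PySem.Chars.findFrom l ['"'] (k : Int) none ∧
    PySem.Chars.findFrom l ['"'] (k : Int) none < (l.length : Int) ∧
    l[(PySem.Chars.findFrom l ['"'] (k : Int) none).toNat]? = some '"' := by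
  obtain ⟨h1, h2, h3⟩ := PySem.Chars.findFrom_natCast_spec l ['"'] k hk h
  have hget := (quote_prefix_iff l _).mp h2
  have hlt : (PySem.Chars.findFrom l ['"'] (k : Int) none).toNat < l.length :=
    (List.getElem?_eq_some_iff.mp hget).1
  exact ⟨h1, by omega, hget⟩

theorem fq_hit (l : List Char) (k : Nat) (hk : k < l.length) (hc : l[k]? = some '"') :
    PySem.Chars.findFrom l ['"'] (k : Int) none = (k : Int) := by
  have hne : PySem.Chars.findFrom l ['"'] (k : Int) none ≠ -1 := by
    rw [Ne, PySem.Chars.findFrom_natCast_eq_neg_one_iff l ['"'] k (by omega)]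
    simp only [not_not]
    exact ((quote_prefix_iff l k).mpr hc).isInfix
  obtain ⟨h1, h2, h3⟩ := PySem.Chars.findFrom_natCast_spec l ['"'] k (by omega) hne
  by_contra hne2
  have : k < (PySem.Chars.findFrom l ['"'] (k : Int) none).toNat := by omega
  exact h3 k le_rfl this ((quote_prefix_iff l k).mpr hc)

theorem fq_step (l : List Char) (k : Nat) (hk : k < l.length) (hc : l[k]? ≠ some '"') :
    PySem.Chars.findFrom l ['"'] (k : Int) none = PySem.Chars.findFrom l ['"'] ((k : Int) + 1) none := by
  have hcast : ((k : Int) + 1) = ((k + 1 : Nat) : Int) := by push_cast; ring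
  rw [hcast]
  by_cases hmem : '"' ∈ l.drop (k+1)
  · have hne' : PySem.Chars.findFrom l ['"'] ((k+1 : Nat) : Int) none ≠ -1 := by
      rw [Ne, PySem.Chars.findFrom_natCast_eq_neg_one_iff l ['"'] (k+1) (by omega)]
      simp only [not_not]
      exact (quote_infix_iff _).mpr hmem
    have hne : PySem.Chars.findFrom l ['"'] ((k : Nat) : Int) none ≠ -1 := by
      rw [Ne, PySem.Chars.findFrom_natCast_eq_neg_one_iff l ['"'] k (by omega)]
      simp only [not_not]
      have hdd : l.drop (k+1) = (l.drop k).drop 1 := by rw [List.drop_drop]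
      exact (quote_infix_iff _).mpr (List.mem_of_mem_drop (by rw [← hdd]; exact hmem))
    obtain ⟨h1, h2, h3⟩ := PySem.Chars.findFrom_natCast_spec l ['"'] k (by omega) hne
    obtain ⟨g1, g2, g3⟩ := PySem.Chars.findFrom_natCast_spec l ['"'] (k+1) (by omega) hne'
    set m := PySem.Chars.findFrom l ['"'] ((k : Nat) : Int) none with hm
    set m' := PySem.Chars.findFrom l ['"'] ((k+1 : Nat) : Int) none with hm'
    have hmk : m.toNat ≠ k := by
      intro he
      exact hc (by rw [← he]; exact (quote_prefix_iff l _).mp h2)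
    have hge : k + 1 ≤ m.toNat := by omega
    have e1 : ¬ m'.toNat < m.toNat := fun hlt => h3 m'.toNat (by omega) hlt g2
    have e2 : ¬ m.toNat < m'.toNat := fun hlt => g3 m.toNat hge hlt h2
    omega
  · have : ¬ '"' ∈ l.drop k := by
      intro hmem2
      rw [List.drop_eq_getElem_cons hk] at hmem2
      rcases List.mem_cons.mp hmem2 with he | ht
      · exact hc (by simp [List.getElem?_eq_some_iff, hk, ← he])
      · exact hmem (by simpa using ht)
    rw [(PySem.Chars.findFrom_natCast_eq_neg_one_iff l ['"'] k (by omega)).mpr, (PySem.Chars.findFrom_natCast_eq_neg_one_iff l ['"'] (k+1) (by omega)).mpr]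
    · intro hinf; exact hmem ((quote_infix_iff _).mp hinf)
    · intro hinf; exact this ((quote_infix_iff _).mp hinf)


theorem aloop_fuel (l : List Char) (n m : Nat) (i : Int) (chars : List Char)
    (hn : (l.length : Int) - i < n) (hm : (l.length : Int) - i < m) :
    consumeALoop l n i chars = consumeALoop l m i chars := by
  induction n generalizing m i chars with
  | zero =>
    cases m with
    | zero => rfl
    | succ m =>
      have h : ¬ i < (l.length : Int) := by omega
      simp [consumeALoop, h]
  | succ n ih =>
    cases m with
    | zero =>
      have h : ¬ i < (l.length : Int) := by omega
      simp [consumeALoop, h]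
    | succ m =>
      by_cases hi : i < (l.length : Int)
      · simp only [consumeALoop, if_pos hi]
        cases hg : PySem.List.pyGet? l i with
        | none => rfl
        | some c =>
          by_cases hq : c = '"'
          · by_cases hd : i + 1 < (l.length : Int) ∧ PySem.List.pyGet? l (i+1) = some '"'
            · simp only [if_pos hq, if_pos hd]; exact ih m (i+2) _ (by omega) (by omega)
            · simp only [if_pos hq, if_neg hd]
          · simp only [if_neg hq]; exact ih m (i+1) _ (by omega) (by omega)
      · simp [consumeALoop, hi]

theorem aloop_jump (l : List Char) (n : Nat) (i : Int) (chars : List Char)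
    (h0 : 0 ≤ i) (hn : (l.length : Int) - i < n) :
    consumeALoop l n i chars =
      (let q := PySem.Chars.findFrom l ['"'] i none;
       if q = -1 then none
       else
         let seg := PySem.List.slice l (some i) (some q)
         if q + 1 < (l.length : Int) ∧ PySem.List.pyGet? l (q + 1) = some '"' then
           consumeALoop l n (q + 2) (chars ++ seg ++ ['"'])
         else some (q + 1, String.ofList (chars ++ seg))) := by
  induction n generalizing i chars with
  | zero =>
    have : (l.length : Int) ≤ i := by omega
    simp [consumeALoop, fq_out l i this]
  | succ n ih =>
    by_cases hi : i < (l.length : Int)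
    · have hik : i = (i.toNat : Int) := by omega
      have hk : i.toNat < l.length := by omega
      have hget : PySem.List.pyGet? l i = some l[i.toNat] :=
        PySem.List.pyGet?_eq_some_getElem l h0 hi
      by_cases hq : l[i.toNat] = '"'
      · -- the current character is the quote: findFrom returns i
        have hfq : PySem.Chars.findFrom l ['"'] i none = i := by
          rw [hik]; exact fq_hit l i.toNat hk (by simp [hk, hq])
        have hseg : PySem.List.slice l (some i) (some i) = ([] : List Char) := by
          rw [PySem.List.slice_toNat _ h0 h0]; simp
        have hne : ¬ (i = -1) := by omega
        simp only [consumeALoop, if_pos hi, hget, if_pos hq, hfq, hne, if_false, hseg]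
        by_cases hd : i + 1 < (l.length : Int) ∧ PySem.List.pyGet? l (i+1) = some '"'
        · simp only [if_pos hd, List.append_nil]
          exact aloop_fuel l n (n+1) (i+2) _ (by omega) (by omega)
        · simp only [if_neg hd, List.append_nil]
      · -- step over a non-quote character
        have hstep : PySem.Chars.findFrom l ['"'] i none
            = PySem.Chars.findFrom l ['"'] (i+1) none := by
          rw [hik]
          exact fq_step l i.toNat hk (by simp [hk]; exact hq)
        simp only [consumeALoop, if_pos hi, hget, if_neg hq]
        rw [ih (i+1) (chars ++ [l[i.toNat]]) (by omega) (by omega)]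
        simp only [hstep]
        by_cases hq1 : PySem.Chars.findFrom l ['"'] (i+1) none = -1
        · simp [hq1]
        · set q := PySem.Chars.findFrom l ['"'] (i+1) none with hqdef
          have hcast : (i : Int) + 1 = ((i.toNat + 1 : Nat) : Int) := by omega
          have hb : ((i.toNat + 1 : Nat) : Int) ≤ q ∧ q < (l.length : Int) ∧ l[q.toNat]? = some '"' := by
            rw [hqdef, hcast]
            exact fq_bounds l (i.toNat + 1) (by omega) (by rw [← hcast]; exact hq1)
          have hseg : PySem.List.slice l (some i) (some q)
              = l[i.toNat] :: PySem.List.slice l (some (i+1)) (some q) := by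
            exact slice_step l i q h0 (by omega) (by omega) l[i.toNat] (by simp [hk])
          simp only [if_neg hq1, hseg]
          by_cases hd : q + 1 < (l.length : Int) ∧ PySem.List.pyGet? l (q+1) = some '"'
          · simp only [if_pos hd]
            rw [aloop_fuel l n (n+1) (q+2) _ (by omega) (by omega)]
            exact congrArg (consumeALoop l (n+1) (q+2)) (by simp)
          · simp only [if_neg hd]
            simp
    · have : (l.length : Int) ≤ i := by omega
      simp [consumeALoop, hi, fq_out l i this]

theorem main_loop (l : List Char) (nB nA : Nat) (i : Int) (chars : List Char) (parts : List (List Char))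
    (h0 : 0 ≤ i) (hA : (l.length : Int) - i < nA) (hB : (l.length : Int) - i + 2 ≤ 2 * nB)
    (hinv : PySem.Chars.join [] parts = chars) :
    consumeALoop l nA i chars = consumeBLoop l nB i parts := by
  induction nB generalizing i chars parts with
  | zero =>
    rw [aloop_jump l nA i chars h0 hA]
    have : (l.length : Int) ≤ i := by omega
    simp [fq_out l i this, consumeBLoop]
  | succ nB ih =>
    rw [aloop_jump l nA i chars h0 hA]
    by_cases hq1 : PySem.Chars.findFrom l ['"'] i none = -1
    · simp [consumeBLoop, hq1]
    · have hile : i ≤ (l.length : Int) := by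
        by_contra hgt
        exact hq1 (fq_out l i (by omega))
      have hik : i = (i.toNat : Int) := by omega
      set q := PySem.Chars.findFrom l ['"'] i none with hqdef
      have hb : (i.toNat : Int) ≤ q ∧ q < (l.length : Int) ∧ l[q.toNat]? = some '"' := by
        rw [hqdef, hik]
        exact fq_bounds l i.toNat (by omega) (by rw [← hik]; exact hq1)
      set seg := PySem.List.slice l (some i) (some q) with hsegdef
      simp only [consumeBLoop, ← hqdef, if_neg hq1, ← hsegdef]
      by_cases hd : q + 1 < (l.length : Int) ∧ PySem.List.pyGet? l (q+1) = some '"'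
      · simp only [if_pos hd]
        have hB' : (l.length : Int) - (q + 2) + 2 ≤ 2 * nB := by omega
        have hinv' : PySem.Chars.join [] ((parts ++ [seg]) ++ [['"']]) = chars ++ seg ++ ['"'] := by
          rw [joinNil_append, joinNil_append, hinv]
        exact ih (q+2) (chars ++ seg ++ ['"']) ((parts ++ [seg]) ++ [['"']]) (by omega) (by omega) hB' hinv'
      · simp only [if_neg hd]
        rw [joinNil_append, hinv]

-- ===== VERDICT (by name: the statement is the Claim_ definition above) =====
theorem consume_verbatim_string_body_py_spec : Claim_equal_consume_verbatim_string_body_py := by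
  intro text start _ hpre
  unfold Pre_consume_verbatim_string_body_py at hpre
  unfold Spec_consume_verbatim_string_body_py consume_verbatim_string_body_py consume_verbatim_string_body_py_alt
  exact main_loop _ _ _ _ _ _ hpre (by omega) (by omega) rfl
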